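-- pv_equiv track=rewrite | github.com/paiml/depyler | examples/hard_tuple_patterns.py | find_min_max_tuples
-- ===== SOURCE A (Python) =====
-- from typing import Tuple, List, Dict, Set
--
-- def find_min_max_tuples(pairs: List[Tuple[int, int]]) -> Tuple[Tuple[int, int], Tuple[int, int]]:
--     """Find the lexicographic min and max from a list of tuples."""
--     lo: Tuple[int, int] = pairs[0]
--     hi: Tuple[int, int] = pairs[0]
--     for p in pairs:
--         if p < lo:
--             lo = p
--         if p > hi:
--             hi = p
--     return (lo, hi)
-- ===== SOURCE B (Python) =====
-- def find_min_max_tuples(pairs):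
--     """Find the lexicographic min and max from a list of tuples."""
--     s = sorted(pairs)
--     return (s[0], s[-1])
-- ===== Notes on version B (the rewrite author's own statement) =====
-- stated objective: alternative
-- what changed: A's fused compare-and-update scan is replaced by sorting the list once and taking the first and last element of the sorted copy.
import Mathlib
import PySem

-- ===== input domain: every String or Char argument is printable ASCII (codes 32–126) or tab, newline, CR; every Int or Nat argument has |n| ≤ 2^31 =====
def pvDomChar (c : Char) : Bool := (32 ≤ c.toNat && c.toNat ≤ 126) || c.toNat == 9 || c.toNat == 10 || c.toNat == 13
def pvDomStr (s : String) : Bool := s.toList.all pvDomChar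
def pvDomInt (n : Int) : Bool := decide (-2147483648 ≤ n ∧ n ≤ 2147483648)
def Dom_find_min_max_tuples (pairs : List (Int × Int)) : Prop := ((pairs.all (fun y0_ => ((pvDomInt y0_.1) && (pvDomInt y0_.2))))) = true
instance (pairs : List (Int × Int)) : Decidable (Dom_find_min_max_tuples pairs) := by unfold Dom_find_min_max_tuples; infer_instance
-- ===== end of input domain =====

-- B sorts the list once and returns (sorted[0], sorted[-1]) instead of A's fused compare-and-update scan; alternative algorithm, O(n log n) vs O(n).
-- Both programs raise IndexError on the empty list, which Pre_ excludes.

-- ===== PORT A =====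
-- Python '<' on int pairs is lexicographic.
def pyLtPair (a b : Int × Int) : Bool := decide (a.1 < b.1 ∨ (a.1 = b.1 ∧ a.2 < b.2))

def find_min_max_tuples (pairs : List (Int × Int)) : (Int × Int) × (Int × Int) :=
  match PySem.List.pyGet? pairs 0 with
  | none => ((0, 0), (0, 0))   -- IndexError in Python; outside Pre_
  | some h =>
    pairs.foldl (fun s p =>
      let lo := if pyLtPair p s.1 then p else s.1
      let hi := if pyLtPair s.2 p then p else s.2
      (lo, hi)) (h, h)

-- ===== PORT B =====
-- sorted(pairs): Python's default tuple order is lexicographic = the order of 'Lex (Int × Int)' (toLex key).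
def find_min_max_tuples_alt (pairs : List (Int × Int)) : (Int × Int) × (Int × Int) :=
  let s := PySem.List.sorted pairs (fun p => toLex p) false
  match PySem.List.pyGet? s 0, PySem.List.pyGet? s (-1) with
  | some lo, some hi => (lo, hi)
  | _, _ => ((0, 0), (0, 0))   -- IndexError in Python; outside Pre_

-- ===== PRECONDITION & SPEC =====
-- Pre_ excludes exactly the empty list, on which both programs raise IndexError.
def Pre_find_min_max_tuples (pairs : List (Int × Int)) : Prop := pairs ≠ []
instance (pairs : List (Int × Int)) : Decidable (Pre_find_min_max_tuples pairs) := by unfold Pre_find_min_max_tuples; infer_instance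
def pvWitness_find_min_max_tuples : (List (Int × Int)) := [(2, 3), (1, 5), (1, 4)]

def Spec_find_min_max_tuples (pairs : List (Int × Int)) (out : (Int × Int) × (Int × Int)) : Prop := out = find_min_max_tuples_alt pairs
instance (pairs : List (Int × Int)) (out : (Int × Int) × (Int × Int)) : Decidable (Spec_find_min_max_tuples pairs out) := by unfold Spec_find_min_max_tuples; infer_instance

-- ===== CLAIM (what is proved, stated in full; the proofs are below) =====
def Claim_equal_find_min_max_tuples : Prop := ∀ (pairs : List (Int × Int)), Dom_find_min_max_tuples pairs → Pre_find_min_max_tuples pairs → Spec_find_min_max_tuples pairs (find_min_max_tuples pairs)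

-- ===== LEMMAS AND PROOFS =====

theorem pyLtPair_iff (a b : Int × Int) : pyLtPair a b = true ↔ toLex a < toLex b := by
  simp [pyLtPair, Prod.Lex.lt_iff]

-- A's pair fold splits into independent lo and hi folds.
theorem foldA_split (t : List (Int × Int)) (lo hi : Int × Int) :
    t.foldl (fun s p =>
      ((if pyLtPair p s.1 then p else s.1), (if pyLtPair s.2 p then p else s.2))) (lo, hi)
    = (t.foldl (fun m p => if pyLtPair p m then p else m) lo,
       t.foldl (fun m p => if pyLtPair m p then p else m) hi) := by
  induction t generalizing lo hi with
  | nil => rfl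
  | cons x t ih => simp only [List.foldl_cons]; exact ih _ _

-- A's running-min fold: member of a::t and lexicographically ≤ all of a::t.
theorem foldMin_spec (t : List (Int × Int)) (a : Int × Int) :
    (t.foldl (fun m p => if pyLtPair p m then p else m) a ∈ a :: t) ∧
    (∀ y ∈ a :: t, toLex (t.foldl (fun m p => if pyLtPair p m then p else m) a) ≤ toLex y) := by
  induction t generalizing a with
  | nil => simp
  | cons x t ih =>
    simp only [List.foldl_cons]
    cases hx : pyLtPair x a with
    | true =>
      have hlt := (pyLtPair_iff x a).mp hx
      obtain ⟨hm, hle⟩ := ih x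
      simp only [if_true]
      refine ⟨?_, ?_⟩
      · rcases List.mem_cons.mp hm with hh | hh
        · simp [hh]
        · simp [hh]
      · intro y hy
        rcases List.mem_cons.mp hy with rfl | hy
        · exact le_of_lt (lt_of_le_of_lt (hle x (by simp)) hlt)
        · rcases List.mem_cons.mp hy with rfl | hy
          · exact hle y (by simp)
          · exact hle y (by simp [hy])
    | false =>
      have hnlt : ¬ toLex x < toLex a := fun hc => by simp [(pyLtPair_iff x a).mpr hc] at hx
      obtain ⟨hm, hle⟩ := ih a
      simp only [Bool.false_eq_true, if_false]
      refine ⟨?_, ?_⟩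
      · rcases List.mem_cons.mp hm with hh | hh
        · simp [hh]
        · simp [hh]
      · intro y hy
        rcases List.mem_cons.mp hy with rfl | hy
        · exact hle y (by simp)
        · rcases List.mem_cons.mp hy with rfl | hy
          · exact le_trans (hle a (by simp)) (le_of_not_gt hnlt)
          · exact hle y (by simp [hy])

-- A's running-max fold: member of a::t and lexicographically ≥ all of a::t.
theorem foldMax_spec (t : List (Int × Int)) (a : Int × Int) :
    (t.foldl (fun m p => if pyLtPair m p then p else m) a ∈ a :: t) ∧
    (∀ y ∈ a :: t, toLex y ≤ toLex (t.foldl (fun m p => if pyLtPair m p then p else m) a)) := by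
  induction t generalizing a with
  | nil => simp
  | cons x t ih =>
    simp only [List.foldl_cons]
    cases hx : pyLtPair a x with
    | true =>
      have hlt := (pyLtPair_iff a x).mp hx
      obtain ⟨hm, hle⟩ := ih x
      simp only [if_true]
      refine ⟨?_, ?_⟩
      · rcases List.mem_cons.mp hm with hh | hh
        · simp [hh]
        · simp [hh]
      · intro y hy
        rcases List.mem_cons.mp hy with rfl | hy
        · exact le_of_lt (lt_of_lt_of_le hlt (hle x (by simp)))
        · rcases List.mem_cons.mp hy with rfl | hy
          · exact hle y (by simp)
          · exact hle y (by simp [hy])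
    | false =>
      have hnlt : ¬ toLex a < toLex x := fun hc => by simp [(pyLtPair_iff a x).mpr hc] at hx
      obtain ⟨hm, hle⟩ := ih a
      simp only [Bool.false_eq_true, if_false]
      refine ⟨?_, ?_⟩
      · rcases List.mem_cons.mp hm with hh | hh
        · simp [hh]
        · simp [hh]
      · intro y hy
        rcases List.mem_cons.mp hy with rfl | hy
        · exact hle y (by simp)
        · rcases List.mem_cons.mp hy with rfl | hy
          · exact le_trans (le_of_not_gt hnlt) (hle a (by simp))
          · exact hle y (by simp [hy])

-- The last element of the key-sorted list is ≥ all elements of xs.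
theorem sorted_getLast_ge (xs : List (Int × Int))
    (h : PySem.List.sorted xs (fun p => toLex p) false ≠ []) :
    ∀ y ∈ xs, toLex y ≤ toLex ((PySem.List.sorted xs (fun p => toLex p) false).getLast h) := by
  intro y hy
  have hmem : y ∈ PySem.List.sorted xs (fun p => toLex p) false :=
    (PySem.List.mem_sorted _ _ _ _).mpr hy
  obtain ⟨i, hi, hyi⟩ := List.mem_iff_getElem.mp hmem
  rw [List.getLast_eq_getElem]
  have := PySem.List.key_sorted_getElem_mono (xs := xs) (key := fun p => toLex p)
    (p := i) (q := (PySem.List.sorted xs (fun p => toLex p) false).length - 1)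
    (by omega) (by omega)
  simpa [hyi] using this

-- ===== VERDICT (by name: the statement is the Claim_ definition above) =====
theorem find_min_max_tuples_spec : Claim_equal_find_min_max_tuples := by
  intro pairs _ hpre
  match pairs, hpre with
  | h :: t, _ =>
    show find_min_max_tuples (h :: t) = find_min_max_tuples_alt (h :: t)
    have hsne : PySem.List.sorted (h :: t) (fun p => toLex p) false ≠ [] := by
      simp [PySem.List.sorted_eq_nil_iff]
    obtain ⟨m, ts, hcons⟩ := List.exists_cons_of_ne_nil hsne
    have hg : PySem.List.pyGet? (h :: t) 0 = some h := by
      simp [PySem.List.pyGet?, PySem.List.pyIdx?]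
    have hg0 : PySem.List.pyGet? (PySem.List.sorted (h :: t) (fun p => toLex p) false) 0
        = some m := by
      rw [hcons]; simp [PySem.List.pyGet?, PySem.List.pyIdx?]
    have hlen : 0 < (PySem.List.sorted (h :: t) (fun p => toLex p) false).length :=
      List.length_pos_iff.mpr hsne
    have hgl : PySem.List.pyGet? (PySem.List.sorted (h :: t) (fun p => toLex p) false) (-1)
        = some ((PySem.List.sorted (h :: t) (fun p => toLex p) false).getLast hsne) := by
      rw [show ((-1 : Int)) = -((1 : Nat) : Int) by norm_num,
        PySem.List.pyGet?_neg_natCast _ 1 (by norm_num) (by omega),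
        List.getElem?_eq_getElem (by omega), List.getLast_eq_getElem]
    simp only [find_min_max_tuples, find_min_max_tuples_alt, hg, hg0, hgl]
    simp only [List.foldl_cons, ite_self]
    rw [foldA_split]
    -- min side
    obtain ⟨hminmem, hminle⟩ := foldMin_spec t h
    have hm_mem : m ∈ h :: t :=
      (PySem.List.mem_sorted _ _ _ _).mp (hcons ▸ List.mem_cons_self)
    have hm_le : ∀ y ∈ h :: t, toLex m ≤ toLex y :=
      PySem.List.key_head_sorted_le _ _ hcons
    -- max side
    obtain ⟨hmaxmem, hmaxge⟩ := foldMax_spec t h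
    have hl_mem : (PySem.List.sorted (h :: t) (fun p => toLex p) false).getLast hsne ∈ h :: t :=
      (PySem.List.mem_sorted _ _ _ _).mp (List.getLast_mem hsne)
    have hl_ge := sorted_getLast_ge (h :: t) hsne
    have e1 : t.foldl (fun m p => if pyLtPair p m then p else m) h = m :=
      toLex.injective (le_antisymm (hminle m hm_mem) (hm_le _ hminmem))
    have e2 : t.foldl (fun m p => if pyLtPair m p then p else m) h
        = (PySem.List.sorted (h :: t) (fun p => toLex p) false).getLast hsne :=
      toLex.injective (le_antisymm (hl_ge _ hmaxmem) (hmaxge _ hl_mem))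
    rw [e1, e2]
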